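-- pv_equiv track=rewrite | github.com/daniel-reich/ubiquitous-fiesta | dMcvdFzSvvqdLJBEC_4.py | num_of_days
-- ===== SOURCE A (Python) =====
-- def num_of_days(cost, savings, start):
--   money = cost-savings
--   count = 0
--   for i in range(1000):
--     for j in range(7):
--       money = money-(start+i+j)
--       count += 1
--       if money<=0:
--         return count
--   return count
-- ===== SOURCE B (Python) =====
-- def num_of_days(cost, savings, start):
--     money = cost - savings
--     for week in range(1000):
--         base = start + week
--         hit = next((d for d in range(7)
--                     if (d + 1) * base + d * (d + 1) // 2 >= money), None)
--         if hit is not None: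
--             return 7 * week + hit + 1
--         money -= 7 * base + 21
--     return 7000
-- ===== Notes on version B (the rewrite author's own statement) =====
-- stated objective: alternative
-- what changed: B loops per week instead of per day: a closed-form triangular-number test ((d+1)*base + d*(d+1)//2 >= money) finds the crossing day within a week, and money is decremented once per week by the whole-week sum 7*base+21, replacing A's per-day subtraction and count accumulator.
import Mathlib
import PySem

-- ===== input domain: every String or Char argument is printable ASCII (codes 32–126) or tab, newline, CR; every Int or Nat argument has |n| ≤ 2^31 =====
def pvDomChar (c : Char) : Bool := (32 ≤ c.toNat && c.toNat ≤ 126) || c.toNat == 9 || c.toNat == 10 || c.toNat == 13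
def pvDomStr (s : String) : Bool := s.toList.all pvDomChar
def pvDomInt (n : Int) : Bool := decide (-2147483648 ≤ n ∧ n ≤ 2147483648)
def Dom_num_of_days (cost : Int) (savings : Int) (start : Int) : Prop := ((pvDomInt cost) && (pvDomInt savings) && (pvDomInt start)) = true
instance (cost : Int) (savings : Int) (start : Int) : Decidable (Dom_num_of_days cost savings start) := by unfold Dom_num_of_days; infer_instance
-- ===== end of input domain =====

-- B replaces A's per-day running subtraction with a per-week loop: a closed-form
-- triangular-number test locates the crossing day inside a week, and money is only
-- updated by the whole-week sum (objective: alternative).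

-- ===== PORT A =====
-- inner 'for j in range(7)': returns .inl count on early return, .inr (money, count) on fall-through
def pvInnerA (start i : Int) (money count : Int) : List Int → Sum Int (Int × Int)
  | [] => .inr (money, count)
  | j :: js =>
      let m := money - (start + i + j)
      let c := count + 1
      if m ≤ 0 then .inl c else pvInnerA start i m c js

-- outer 'for i in range(1000)'
def pvOuterA (start : Int) (money count : Int) : List Int → Int
  | [] => count
  | i :: is =>
      match pvInnerA start i money count (PySem.List.pyRange 0 7 1) with
      | .inl c => c
      | .inr (m, c) => pvOuterA start m c is

def num_of_days (cost : Int) (savings : Int) (start : Int) : Int :=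
  pvOuterA start (cost - savings) 0 (PySem.List.pyRange 0 1000 1)

-- ===== PORT B =====
-- 'next((d for d in range(7) if (d+1)*base + d*(d+1)//2 >= money), None)'
def pvFindHit (base money : Int) : List Int → Option Int
  | [] => none
  | d :: ds =>
      if (d + 1) * base + PySem.Int.floordiv (d * (d + 1)) 2 ≥ money then some d
      else pvFindHit base money ds

-- 'for week in range(1000)'
def pvOuterB (start money : Int) : List Int → Int
  | [] => 7000
  | w :: ws =>
      let base := start + w
      match pvFindHit base money (PySem.List.pyRange 0 7 1) with
      | some d => 7 * w + d + 1
      | none => pvOuterB start (money - (7 * base + 21)) ws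

def num_of_days_alt (cost : Int) (savings : Int) (start : Int) : Int :=
  pvOuterB start (cost - savings) (PySem.List.pyRange 0 1000 1)

-- ===== PRECONDITION & SPEC =====
def Spec_num_of_days (cost : Int) (savings : Int) (start : Int) (out : Int) : Prop := out = num_of_days_alt cost savings start
instance (cost : Int) (savings : Int) (start : Int) (out : Int) : Decidable (Spec_num_of_days cost savings start out) := by unfold Spec_num_of_days; infer_instance

-- ===== CLAIM (what is proved, stated in full; the proofs are below) =====
def Claim_equal_num_of_days : Prop := ∀ (cost : Int) (savings : Int) (start : Int), Dom_num_of_days cost savings start → Spec_num_of_days cost savings start (num_of_days cost savings start)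

-- ===== LEMMAS AND PROOFS =====

set_option maxHeartbeats 2000000 in
theorem pv_main (fuel : Nat) (q : Int) (_hq : 0 ≤ q) (hfuel : q + fuel = 1000) :
    ∀ (start m : Int),
      pvOuterA start m (7 * q) (PySem.List.pyRange q 1000 1) =
      pvOuterB start m (PySem.List.pyRange q 1000 1) := by
  induction fuel generalizing q with
  | zero =>
      intro start m
      have hq1 : q = 1000 := by omega
      subst hq1
      rw [PySem.List.pyRange_one_eq_nil (by norm_num)]
      simp [pvOuterA, pvOuterB]
  | succ k ih =>
      intro start m
      have hqlt : q < 1000 := by omega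
      rw [PySem.List.pyRange_one_cons hqlt]
      have hr7 : PySem.List.pyRange 0 7 1 = [0, 1, 2, 3, 4, 5, 6] := by decide
      have t0 : PySem.Int.floordiv (0 * (0 + 1)) 2 = 0 := by decide
      have t1 : PySem.Int.floordiv (1 * (1 + 1)) 2 = 1 := by decide
      have t2 : PySem.Int.floordiv (2 * (2 + 1)) 2 = 3 := by decide
      have t3 : PySem.Int.floordiv (3 * (3 + 1)) 2 = 6 := by decide
      have t4 : PySem.Int.floordiv (4 * (4 + 1)) 2 = 10 := by decide
      have t5 : PySem.Int.floordiv (5 * (5 + 1)) 2 = 15 := by decide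
      have t6 : PySem.Int.floordiv (6 * (6 + 1)) 2 = 21 := by decide
      simp only [pvOuterA, pvOuterB, pvInnerA, pvFindHit, hr7,
                 t0, t1, t2, t3, t4, t5, t6, ge_iff_le]
      split_ifs with h0 h1 h2 h3 h4 h5 h6 h7 h8 h9 h10 h11 h12 h13 <;> dsimp only <;>
        first
          | omega
          | (rw [show (7 : Int) * q + 1 + 1 + 1 + 1 + 1 + 1 + 1 = 7 * (q + 1) from by ring,
                 show m - (start + q + 0) - (start + q + 1) - (start + q + 2) - (start + q + 3)
                      - (start + q + 4) - (start + q + 5) - (start + q + 6)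
                      = m - (7 * (start + q) + 21) from by ring]
             exact ih (q + 1) (by omega) (by omega) start _)

-- ===== VERDICT (by name: the statement is the Claim_ definition above) =====
theorem num_of_days_spec : Claim_equal_num_of_days := by
  intro cost savings start _
  unfold Spec_num_of_days num_of_days num_of_days_alt
  have h := pv_main 1000 0 (by norm_num) (by norm_num) start (cost - savings)
  simpa using h
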